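-- pv_equiv track=rewrite | github.com/BeyonderXX/MINER | utils/datasets.py | get_case_feature
-- ===== SOURCE A (Python) =====
-- morph2idx = {'isupper': 1, 'islower': 2, 'istitle': 3, 'isdigit': 4, 'other': 5}
--
-- def get_case_feature(span_idxes, words, max_span_len):
--     """
--     this function use to characterize the capitalization feature.
--     Args:
--         span_idxes:
--         words:
--
--     Returns:
--
--     """
--     caseidxes = []
--
--     for idxes in span_idxes:
--         sid, eid = idxes
--         span_word = words[sid:eid + 1]
--         caseidx1 = [0 for _ in range(max_span_len)]
--
--         for j, token in enumerate(span_word):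
--             if token.isupper():
--                 tfeat = 'isupper'
--             elif token.islower():
--                 tfeat = 'islower'
--             elif token.istitle():
--                 tfeat = 'istitle'
--             elif token.isdigit():
--                 tfeat = 'isdigit'
--             else:
--                 tfeat = 'other'
--             caseidx1[j] = morph2idx[tfeat]
--         caseidxes.append(caseidx1)
--
--     return caseidxes
-- ===== SOURCE B (Python) =====
-- def _feat(token):
--     if token.isupper():
--         return 1
--     elif token.islower():
--         return 2
--     elif token.istitle():
--         return 3
--     elif token.isdigit():
--         return 4
--     else:
--         return 5
--
--
-- def get_case_feature(span_idxes, words, max_span_len):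
--     word_feats = [_feat(w) for w in words]
--     caseidxes = []
--     for sid, eid in span_idxes:
--         vec = [0] * max_span_len
--         for j, f in enumerate(word_feats[sid:eid + 1]):
--             vec[j] = f
--         caseidxes.append(vec)
--     return caseidxes
-- ===== Notes on version B (the rewrite author's own statement) =====
-- stated objective: alternative
-- what changed: B precomputes each word's capitalization index once in a single pass over words and then only copies precomputed integers per span, instead of re-running the isupper/islower/istitle/isdigit string tests inside every span as A does.
import Mathlib
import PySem

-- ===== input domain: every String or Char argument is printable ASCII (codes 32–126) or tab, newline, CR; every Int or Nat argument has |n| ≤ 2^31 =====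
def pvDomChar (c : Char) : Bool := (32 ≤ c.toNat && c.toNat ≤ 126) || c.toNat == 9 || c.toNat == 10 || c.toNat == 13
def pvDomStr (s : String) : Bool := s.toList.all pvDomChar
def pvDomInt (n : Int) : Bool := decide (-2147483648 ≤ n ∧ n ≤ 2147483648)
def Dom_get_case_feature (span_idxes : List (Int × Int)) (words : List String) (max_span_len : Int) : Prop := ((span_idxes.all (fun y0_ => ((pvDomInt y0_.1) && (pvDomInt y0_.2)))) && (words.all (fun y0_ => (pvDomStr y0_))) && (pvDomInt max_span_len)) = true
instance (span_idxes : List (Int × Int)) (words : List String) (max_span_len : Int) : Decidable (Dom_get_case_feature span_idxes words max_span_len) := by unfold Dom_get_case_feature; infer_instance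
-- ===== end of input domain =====

-- B precomputes each word's capitalization index once, then only copies precomputed
-- integers per span (alternative decomposition; same results as A).

-- hand ports of Python str.isupper / str.islower / str.istitle, exact on the
-- printable-ASCII (+ tab/newline/CR) domain, where the cased characters are exactly
-- the ASCII letters:
def pyIsupper (s : String) : Bool :=
  s.toList.any PySem.Chars.isalpha && !(s.toList.any PySem.Chars.islower)
def pyIslower (s : String) : Bool :=
  s.toList.any PySem.Chars.isalpha && !(s.toList.any PySem.Chars.isupper)
-- istitle: scan keeping (still-ok, previous-char-cased, some-cased-seen)
def pyIstitle (s : String) : Bool :=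
  let st := s.toList.foldl (fun (st : Bool × Bool × Bool) c =>
    if PySem.Chars.isupper c then (st.1 && !st.2.1, true, true)
    else if PySem.Chars.islower c then (st.1 && st.2.1, true, true)
    else (st.1, false, st.2.2)) (true, false, false)
  st.1 && st.2.2

-- ===== PORT A =====
def morph2idx : PySem.Dict String Int :=
  PySem.Dict.ofList [("isupper", 1), ("islower", 2), ("istitle", 3), ("isdigit", 4), ("other", 5)]

def get_case_feature (span_idxes : List (Int × Int)) (words : List String) (max_span_len : Int) : List (List Int) :=
  span_idxes.foldl (fun caseidxes idxes =>
    let sid := idxes.1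
    let eid := idxes.2
    let span_word := PySem.List.slice words (some sid) (some (eid + 1))
    let caseidx1 : List Int := (PySem.List.pyRange 0 max_span_len 1).map (fun _ => 0)
    let caseidx1 := (PySem.List.enumerate span_word).foldl (fun v jt =>
      let tfeat : String :=
        if pyIsupper jt.2 then "isupper"
        else if pyIslower jt.2 then "islower"
        else if pyIstitle jt.2 then "istitle"
        else if PySem.Str.strIsdigit jt.2 then "isdigit"
        else "other"
      -- Python raises IndexError when jt.1 ≥ len(v); those inputs are outside Pre_
      v.set jt.1.toNat (PySem.Dict.getD morph2idx tfeat 0)) caseidx1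
    caseidxes ++ [caseidx1]) []

-- ===== PORT B =====
def featB (token : String) : Int :=
  if pyIsupper token then 1
  else if pyIslower token then 2
  else if pyIstitle token then 3
  else if PySem.Str.strIsdigit token then 4
  else 5

def spanVecB (word_feats : List Int) (sid eid max_span_len : Int) : List Int :=
  -- vec = [0] * max_span_len  ([0]*n is empty for n ≤ 0, as in Python)
  let vec : List Int := List.replicate max_span_len.toNat 0
  (PySem.List.enumerate (PySem.List.slice word_feats (some sid) (some (eid + 1)))).foldl
    -- Python raises IndexError when j ≥ len(vec); those inputs are outside Pre_
    (fun v jf => v.set jf.1.toNat jf.2) vec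

def get_case_feature_alt (span_idxes : List (Int × Int)) (words : List String) (max_span_len : Int) : List (List Int) :=
  let word_feats := words.map featB
  span_idxes.map (fun p => spanVecB word_feats p.1 p.2 max_span_len)

-- ===== PRECONDITION & SPEC =====
-- Pre_ excludes exactly the inputs on which the Python raises IndexError:
-- a nonempty span slice longer than max_span_len (both A and B raise there).
def Pre_get_case_feature (span_idxes : List (Int × Int)) (words : List String) (max_span_len : Int) : Prop :=
  ∀ p ∈ span_idxes,
    ((PySem.List.slice words (some p.1) (some (p.2 + 1))).length : Int) ≤ max_span_len ∨
    (PySem.List.slice words (some p.1) (some (p.2 + 1))).length = 0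
instance (span_idxes : List (Int × Int)) (words : List String) (max_span_len : Int) : Decidable (Pre_get_case_feature span_idxes words max_span_len) := by unfold Pre_get_case_feature; infer_instance

def pvWitness_get_case_feature : (List (Int × Int)) × List String × Int := ([(0, 1)], ["Ab", "XY"], 3)

def Spec_get_case_feature (span_idxes : List (Int × Int)) (words : List String) (max_span_len : Int) (out : List (List Int)) : Prop := out = get_case_feature_alt span_idxes words max_span_len
instance (span_idxes : List (Int × Int)) (words : List String) (max_span_len : Int) (out : List (List Int)) : Decidable (Spec_get_case_feature span_idxes words max_span_len out) := by unfold Spec_get_case_feature; infer_instance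

-- ===== CLAIM (what is proved, stated in full; the proofs are below) =====
def Claim_equal_get_case_feature : Prop := ∀ (span_idxes : List (Int × Int)) (words : List String) (max_span_len : Int), Dom_get_case_feature span_idxes words max_span_len → Pre_get_case_feature span_idxes words max_span_len → Spec_get_case_feature span_idxes words max_span_len (get_case_feature span_idxes words max_span_len)

-- ===== LEMMAS AND PROOFS =====

-- the classification chain + dict lookup of A equals B's integer chain
theorem featA_eq_featB (t : String) :
    PySem.Dict.getD morph2idx
      (if pyIsupper t then "isupper"
       else if pyIslower t then "islower"
       else if pyIstitle t then "istitle"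
       else if PySem.Str.strIsdigit t then "isdigit"
       else "other") 0 = featB t := by
  unfold featB
  split_ifs <;> decide

-- slicing commutes with map
theorem slice_map {α β : Type} (f : α → β) (l : List α) (a b : Option Int) :
    PySem.List.slice (l.map f) a b = (PySem.List.slice l a b).map f := by
  simp [PySem.List.slice, PySem.List.clampIdx]

-- zeros of A (range-comprehension) = zeros of B (replicate)
theorem zeros_eq (n : Int) :
    (PySem.List.pyRange 0 n 1).map (fun _ => (0 : Int)) = List.replicate n.toNat 0 := by
  rw [PySem.List.pyRange_one]
  simp [List.eq_replicate_iff]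

-- the inner assignment loops agree once the word features are precomputed
theorem inner_foldl_eq (span : List String) : ∀ (s : Int) (z : List Int),
    (PySem.List.enumerate (span.map featB) s).foldl (fun v jf => v.set jf.1.toNat jf.2) z =
    (PySem.List.enumerate span s).foldl (fun v jt =>
      v.set jt.1.toNat (PySem.Dict.getD morph2idx
        (if pyIsupper jt.2 then "isupper"
         else if pyIslower jt.2 then "islower"
         else if pyIstitle jt.2 then "istitle"
         else if PySem.Str.strIsdigit jt.2 then "isdigit"
         else "other") 0)) z := by
  induction span with
  | nil => intro s z; simp [PySem.List.enumerate_nil]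
  | cons hd tl ih =>
    intro s z
    simp only [List.map_cons, PySem.List.enumerate_cons, List.foldl_cons]
    rw [featA_eq_featB, ih]

-- append-accumulating foldl is a map
theorem foldl_append_singleton_eq_map {α β : Type} (g : α → β) (l : List α) :
    ∀ acc : List β, l.foldl (fun acc x => acc ++ [g x]) acc = acc ++ l.map g := by
  induction l with
  | nil => simp
  | cons hd tl ih => intro acc; simp [ih]

-- ===== VERDICT (by name: the statement is the Claim_ definition above) =====
theorem get_case_feature_spec : Claim_equal_get_case_feature := by
  intro span_idxes words max_span_len _ _
  unfold Spec_get_case_feature get_case_feature get_case_feature_alt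
  rw [foldl_append_singleton_eq_map]
  simp only [List.nil_append]
  apply List.map_congr_left
  intro p _
  unfold spanVecB
  rw [slice_map, inner_foldl_eq, zeros_eq]
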